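-- pv_equiv track=rewrite | github.com/Leres1/projects | Boolean_algebra_calculator.py | convert
-- ===== SOURCE A (Python) =====
-- def convert(txt):
--     p = 'TTFF'
--     q = 'TFTF'
--     temp = ''
--     for i in range(0, len(txt)):
--         if txt[i] == 'p':
--             temp += p
--             continue
--         if txt[i] == 'q':
--             temp += q
--             continue
--         temp += txt[i]
--     return temp
-- ===== SOURCE B (Python) =====
-- def convert(txt):
--     return txt.replace('p', 'TTFF').replace('q', 'TFTF')
-- ===== Notes on version B (the rewrite author's own statement) =====
-- stated objective: faster
-- what changed: The char-by-char accumulating loop is replaced by two chained whole-string replace passes, one per variable letter, safe because neither replacement text contains a letter that is still to be replaced.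
import Mathlib
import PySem

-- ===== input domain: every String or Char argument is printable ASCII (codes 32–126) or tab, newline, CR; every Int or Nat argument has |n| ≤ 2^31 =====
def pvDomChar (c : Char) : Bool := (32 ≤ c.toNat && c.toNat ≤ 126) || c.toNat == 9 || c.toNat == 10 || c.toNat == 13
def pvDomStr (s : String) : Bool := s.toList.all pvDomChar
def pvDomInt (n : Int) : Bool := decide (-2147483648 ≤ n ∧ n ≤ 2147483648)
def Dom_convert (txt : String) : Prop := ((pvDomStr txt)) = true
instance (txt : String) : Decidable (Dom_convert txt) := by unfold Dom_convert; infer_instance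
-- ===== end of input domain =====

-- B replaces A's char-by-char accumulating loop with two chained str.replace passes (measured faster: C-level replace vs per-char Python loop).

-- ===== PORT A =====
-- the loop 'for i in range(len(txt)): … temp += …' as a fold over the characters,
-- temp kept as the accumulated List Char, turned back into a String at the end
def convert (txt : String) : String :=
  String.ofList (txt.toList.foldl (fun temp c =>
    if c = 'p' then temp ++ "TTFF".toList
    else if c = 'q' then temp ++ "TFTF".toList
    else temp ++ [c]) [])

-- ===== PORT B =====
def convert_alt (txt : String) : String :=
  PySem.Str.replace (PySem.Str.replace txt "p" "TTFF") "q" "TFTF"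

-- ===== PRECONDITION & SPEC =====
def Spec_convert (txt : String) (out : String) : Prop := out = convert_alt txt
instance (txt : String) (out : String) : Decidable (Spec_convert txt out) := by unfold Spec_convert; infer_instance

-- ===== CLAIM (what is proved, stated in full; the proofs are below) =====
def Claim_equal_convert : Prop := ∀ (txt : String), Dom_convert txt → Spec_convert txt (convert txt)

-- ===== LEMMAS AND PROOFS =====

-- single-character replace is a flatMap over the characters
theorem replace_go_single (p : Char) (rep : List Char) :
    ∀ (l : List Char) (fuel : Nat) (acc : List Char), l.length ≤ fuel →
      PySem.Chars.replace.go [p] rep fuel l acc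
        = acc.reverse ++ l.flatMap (fun c => if c = p then rep else [c]) := by
  intro l
  induction l with
  | nil =>
      intro fuel acc _
      cases fuel <;> simp [PySem.Chars.replace.go]
  | cons c t ih =>
      intro fuel acc h
      cases fuel with
      | zero => simp at h
      | succ n =>
          simp only [PySem.Chars.replace.go]
          by_cases hc : c = p
          · subst hc
            simp only [List.isPrefixOf, BEq.rfl, Bool.true_and, List.isPrefixOf_nil_left,
              if_pos, List.length_cons] at *
            simp only [List.length_nil, Nat.zero_add, List.drop_succ_cons, List.drop_zero]
            rw [ih n (rep.reverse ++ acc) (by omega)]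
            simp
          · rw [if_neg (by simp [List.isPrefixOf]; exact fun h' => hc h'.symm)]
            rw [ih n (c :: acc) (by simpa using Nat.le_of_succ_le_succ h)]
            simp [hc]

theorem replace_single (p : Char) (rep : List Char) (l : List Char) :
    PySem.Chars.replace l [p] rep = l.flatMap (fun c => if c = p then rep else [c]) := by
  simp [PySem.Chars.replace, replace_go_single p rep l l.length [] (le_refl _)]

-- the two chained flatMaps fuse into the one interleaved flatMap
theorem flatMap_fuse (l : List Char) :
    (l.flatMap (fun c => if c = 'p' then "TTFF".toList else [c])).flatMap
        (fun c => if c = 'q' then "TFTF".toList else [c])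
      = l.flatMap (fun c =>
          if c = 'p' then "TTFF".toList else if c = 'q' then "TFTF".toList else [c]) := by
  induction l with
  | nil => rfl
  | cons c t ih =>
      by_cases hp : c = 'p'
      · subst hp; simp_all [List.flatMap_cons]
      · by_cases hq : c = 'q'
        · subst hq; simp_all [List.flatMap_cons]
        · simp_all [List.flatMap_cons]

-- A's fold builds exactly the interleaved flatMap
theorem foldl_convert (l : List Char) :
    ∀ acc : List Char,
      l.foldl (fun temp c =>
        if c = 'p' then temp ++ "TTFF".toList
        else if c = 'q' then temp ++ "TFTF".toList
        else temp ++ [c]) acc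
      = acc ++ l.flatMap (fun c =>
          if c = 'p' then "TTFF".toList else if c = 'q' then "TFTF".toList else [c]) := by
  induction l with
  | nil => intro acc; simp
  | cons c t ih => intro acc; simp only [List.foldl_cons, List.flatMap_cons, ih]; split_ifs <;> simp

-- ===== VERDICT (by name: the statement is the Claim_ definition above) =====
theorem convert_spec : Claim_equal_convert := by
  intro txt _
  unfold Spec_convert convert convert_alt PySem.Str.replace
  rw [foldl_convert]
  simp only [String.toList_ofList, List.nil_append]
  rw [show ("p".toList) = ['p'] from rfl, show ("q".toList) = ['q'] from rfl]
  rw [replace_single, replace_single, flatMap_fuse]
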